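-- pv_equiv track=rewrite | github.com/mpfo0106/Algo_python | udemy_코테/udemy2.py | solution
-- ===== SOURCE A (Python) =====
-- class Node:
--     def __init__(self, data):
--         self.data = data
--         self.prev = None
--         self.next = None
--
-- def solution(s):
--     head = Node(None)  # Head node
--     current = head
--     visit = {}
--
--     for item in s.split():
--         if item.isdigit():
--             # Create a new node for every visit
--             new_page = Node(item)
--             new_page.prev = current
--             current.next = new_page
--             current = new_page
--
--             # Update visit count
--             visit[item] = visit.get(item, 0) + 1
--
--         elif item == 'B' and current.prev and current.prev.data is not None:
--             # Move back if possible, ignoring if it's the head node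
--             current = current.prev
--             visit[current.data] = visit.get(current.data, 0) + 1
--
--         elif item == 'F' and current.next:
--             # Move forward if possible
--             current = current.next
--             visit[current.data] = visit.get(current.data, 0) + 1
--         # Else, ignore if 'B' or 'F' cannot be executed
--
--     answer = max(visit.values(), default=0)
--     return answer
-- ===== SOURCE B (Python) =====
-- def solution(s):
--     back, fwd = [], []
--     current = None
--     visit = {}
--     for tok in s.split():
--         if tok.isdigit():
--             if current is not None:
--                 back.append(current)
--             current = tok
--             fwd.clear()
--             visit[tok] = visit.get(tok, 0) + 1
--         elif tok == 'B' and back: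
--             if current is not None:
--                 fwd.append(current)
--             current = back.pop()
--             visit[current] = visit.get(current, 0) + 1
--         elif tok == 'F' and fwd:
--             if current is not None:
--                 back.append(current)
--             current = fwd.pop()
--             visit[current] = visit.get(current, 0) + 1
--     return max(visit.values(), default=0)
-- ===== Notes on version B (the rewrite author's own statement) =====
-- stated objective: simpler
-- what changed: A simulates the history by mutating a heap of doubly-linked Node objects with a None-data head sentinel; B replaces the whole node graph by the classic two-stack model (back stack, forward stack, current page) plus the same visit counter, clearing the forward stack on each new visit.
import Mathlib
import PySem

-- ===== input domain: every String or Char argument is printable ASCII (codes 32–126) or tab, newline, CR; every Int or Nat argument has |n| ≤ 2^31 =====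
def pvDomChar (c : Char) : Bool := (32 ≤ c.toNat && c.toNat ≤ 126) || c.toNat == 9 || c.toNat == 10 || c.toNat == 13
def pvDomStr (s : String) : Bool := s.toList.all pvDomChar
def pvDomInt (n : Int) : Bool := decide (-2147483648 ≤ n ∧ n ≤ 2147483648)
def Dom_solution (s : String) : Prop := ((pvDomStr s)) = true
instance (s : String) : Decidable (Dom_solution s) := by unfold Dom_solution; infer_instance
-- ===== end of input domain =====

-- B replaces A's heap of doubly-linked Node objects by two plain stacks (simpler, no node class);
-- equivalence of the returned maximum visit count is proved below.

-- ===== PORT A =====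
-- A mutates a pointer-linked graph of Node objects. The port models the heap literally as an
-- arena: a list of nodes (data, prev, next) where prev/next are indices (Option Nat = pointer
-- or None), `current` is the index of the current node, exactly A's pointer updates step by step.
-- A's visit dict keys are `item` (a str) and `current.data` (Optional[str]); key type Option String,
-- a plain digit token entering as `some tok`.
abbrev ANode := Option String × Option Nat × Option Nat   -- (data, prev, next)

def dataF (arr : List ANode) (i : Nat) : Option String := (arr[i]?).bind (fun n => n.1)
def prevF (arr : List ANode) (i : Nat) : Option Nat := (arr[i]?).bind (fun n => n.2.1)
def nextF (arr : List ANode) (i : Nat) : Option Nat := (arr[i]?).bind (fun n => n.2.2)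

def stepA (st : List ANode × Nat × PySem.Dict (Option String) Int) (item : String) :
    List ANode × Nat × PySem.Dict (Option String) Int :=
  match st with
  | (arr, cur, visit) =>
    if PySem.Str.strIsdigit item then
      -- new_page = Node(item); new_page.prev = current; current.next = new_page; current = new_page
      let idx := arr.length
      ((arr.modify cur (fun n => (n.1, n.2.1, some idx))) ++ [(some item, some cur, none)], idx,
        visit.insert (some item) (visit.getD (some item) 0 + 1))
    else if item == "B" then
      -- elif item == 'B' and current.prev and current.prev.data is not None
      match prevF arr cur with
      | some p =>
        match dataF arr p with
        | some d => (arr, p, visit.insert (some d) (visit.getD (some d) 0 + 1))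
        | none => (arr, cur, visit)
      | none => (arr, cur, visit)
    else if item == "F" then
      -- elif item == 'F' and current.next
      match nextF arr cur with
      | some n => (arr, n, visit.insert (dataF arr n) (visit.getD (dataF arr n) 0 + 1))
      | none => (arr, cur, visit)
    else (arr, cur, visit)

def solution (s : String) : Int :=
  let st := (PySem.Str.split₀ s).foldl stepA ([((none : Option String), (none : Option Nat), (none : Option Nat))], 0, PySem.Dict.empty)
  PySem.List.maxD st.2.2.values (fun v => v) 0

-- ===== PORT B =====
-- Two-stack history: back, fwd (push/pop at the END, as Source B's append/pop), current page, visit counter.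
def stepB (st : List String × Option String × List String × PySem.Dict String Int) (tok : String) :
    List String × Option String × List String × PySem.Dict String Int :=
  match st with
  | (back, cur, fwd, visit) =>
    if PySem.Str.strIsdigit tok then
      ((match cur with | some c => back ++ [c] | none => back), some tok, [],
        visit.insert tok (visit.getD tok 0 + 1))
    else if tok == "B" then
      match back.getLast? with
      | some c => (back.dropLast, some c,
          (match cur with | some x => fwd ++ [x] | none => fwd),
          visit.insert c (visit.getD c 0 + 1))
      | none => (back, cur, fwd, visit)
    else if tok == "F" then
      match fwd.getLast? with
      | some c => ((match cur with | some x => back ++ [x] | none => back), some c, fwd.dropLast,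
          visit.insert c (visit.getD c 0 + 1))
      | none => (back, cur, fwd, visit)
    else (back, cur, fwd, visit)

def solution_alt (s : String) : Int :=
  let st := (PySem.Str.split₀ s).foldl stepB ([], (none : Option String), [], PySem.Dict.empty)
  PySem.List.maxD st.2.2.2.values (fun v => v) 0

-- ===== PRECONDITION & SPEC =====
def Spec_solution (s : String) (out : Int) : Prop := out = solution_alt s
instance (s : String) (out : Int) : Decidable (Spec_solution s out) := by unfold Spec_solution; infer_instance

-- ===== CLAIM (what is proved, stated in full; the proofs are below) =====
def Claim_equal_solution : Prop := ∀ (s : String), Dom_solution s → Spec_solution s (solution s)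

-- ===== LEMMAS AND PROOFS =====

-- key-injection of B's dict into A's (A's keys are Optional[str])
def mapK (d : PySem.Dict String Int) : PySem.Dict (Option String) Int :=
  PySem.Dict.mk (d.items.map (fun kv => (some kv.1, kv.2)))

-- the back stack (most recent first) matches the prev-chain from node i
def BackSim (arr : List ANode) : Nat → List String → Prop
  | i, [] => match prevF arr i with
      | none => True
      | some p => p < i ∧ dataF arr p = none
  | i, d :: bs => ∃ p, prevF arr i = some p ∧ p < i ∧ dataF arr p = some d ∧
      nextF arr p = some i ∧ BackSim arr p bs

-- the forward stack (nearest first) matches the next-chain from node i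
def FwdSim (arr : List ANode) : Nat → List String → Prop
  | i, [] => nextF arr i = none
  | i, d :: fs => ∃ n, nextF arr i = some n ∧ i < n ∧ dataF arr n = some d ∧
      prevF arr n = some i ∧ FwdSim arr n fs

def Sim (a : List ANode × Nat × PySem.Dict (Option String) Int)
    (b : List String × Option String × List String × PySem.Dict String Int) : Prop :=
  a.2.1 < a.1.length ∧
  BackSim a.1 a.2.1 b.1.reverse ∧
  dataF a.1 a.2.1 = b.2.1 ∧
  FwdSim a.1 a.2.1 b.2.2.1.reverse ∧
  (dataF a.1 a.2.1 = none → nextF a.1 a.2.1 = none ∧ b.1 = []) ∧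
  a.2.2 = mapK b.2.2.2

lemma lt_of_dataF_some {arr : List ANode} {j : Nat} {d : String}
    (h : dataF arr j = some d) : j < arr.length := by
  by_contra hc
  simp [dataF, List.getElem?_eq_none (by omega : arr.length ≤ j)] at h

lemma lt_of_nextF_some {arr : List ANode} {j n : Nat}
    (h : nextF arr j = some n) : j < arr.length := by
  by_contra hc
  simp [nextF, List.getElem?_eq_none (by omega : arr.length ≤ j)] at h

-- field preservation under A's digit step: modify cur's next, append one node
lemma dataF_mod (arr : List ANode) (c : Nat) (v : Option Nat) (x : ANode) {j : Nat}
    (hj : j < arr.length) :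
    dataF ((arr.modify c (fun n => (n.1, n.2.1, v))) ++ [x]) j = dataF arr j := by
  have hj' : j < (arr.modify c (fun n => (n.1, n.2.1, v))).length := by simpa using hj
  simp [dataF, List.getElem?_append_left hj', List.getElem?_modify]
  rcases arr[j]? with _ | n <;> by_cases h : c = j <;> simp [h]

lemma prevF_mod (arr : List ANode) (c : Nat) (v : Option Nat) (x : ANode) {j : Nat}
    (hj : j < arr.length) :
    prevF ((arr.modify c (fun n => (n.1, n.2.1, v))) ++ [x]) j = prevF arr j := by
  have hj' : j < (arr.modify c (fun n => (n.1, n.2.1, v))).length := by simpa using hj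
  simp [prevF, List.getElem?_append_left hj', List.getElem?_modify]
  rcases arr[j]? with _ | n <;> by_cases h : c = j <;> simp [h]

lemma nextF_mod (arr : List ANode) (c : Nat) (v : Option Nat) (x : ANode) {j : Nat}
    (hj : j < arr.length) (hne : j ≠ c) :
    nextF ((arr.modify c (fun n => (n.1, n.2.1, v))) ++ [x]) j = nextF arr j := by
  have hj' : j < (arr.modify c (fun n => (n.1, n.2.1, v))).length := by simpa using hj
  simp [nextF, List.getElem?_append_left hj', List.getElem?_modify]
  rcases arr[j]? with _ | n <;> by_cases h : c = j <;> simp [h]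
  omega

lemma nextF_mod_self (arr : List ANode) (c : Nat) (v : Option Nat) (x : ANode)
    (hc : c < arr.length) :
    nextF ((arr.modify c (fun n => (n.1, n.2.1, v))) ++ [x]) c = v := by
  have hc' : c < (arr.modify c (fun n => (n.1, n.2.1, v))).length := by simpa using hc
  simp [nextF, List.getElem?_append_left hc', List.getElem?_eq_getElem hc]

lemma getElem?_append_len (arr : List ANode) (x : ANode) :
    ((arr.modify c (fun n => (n.1, n.2.1, v))) ++ [x])[arr.length]? = some x := by
  have : (arr.modify c (fun n => (n.1, n.2.1, v))).length = arr.length := by simp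
  rw [← this, List.getElem?_append_right (by omega)]
  simp

lemma backSim_mod (arr : List ANode) (c : Nat) (v : Option Nat) (x : ANode) :
    ∀ (bs : List String) (i : Nat), BackSim arr i bs → i < arr.length → i ≤ c →
    BackSim ((arr.modify c (fun n => (n.1, n.2.1, v))) ++ [x]) i bs := by
  intro bs
  induction bs with
  | nil =>
    intro i h hi _
    simp only [BackSim] at h ⊢
    rw [prevF_mod arr c v x hi]
    rcases hp : prevF arr i with _ | p
    · simp
    · rw [hp] at h
      exact ⟨h.1, by rw [dataF_mod arr c v x (by omega)]; exact h.2⟩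
  | cons d bs ih =>
    intro i h hi hic
    obtain ⟨p, hp, hpi, hd, hn, hrec⟩ := h
    exact ⟨p, by rw [prevF_mod arr c v x hi]; exact hp, hpi,
      by rw [dataF_mod arr c v x (by omega)]; exact hd,
      by rw [nextF_mod arr c v x (by omega) (by omega)]; exact hn,
      ih p hrec (by omega) (by omega)⟩

-- mapK commutes with the dict operations both programs use
lemma mapK_get? (d : PySem.Dict String Int) (k : String) :
    (mapK d).get? (some k) = d.get? k := by
  rcases d with ⟨items⟩
  induction items with
  | nil => simp [mapK, PySem.Dict.get?]
  | cons kv rest ih =>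
    simp only [mapK, PySem.Dict.get?, List.map_cons, List.find?] at ih ⊢
    by_cases h : (kv.1 == k) = true
    · simp [h]
    · rw [Bool.not_eq_true] at h
      simp only [h, show ((some kv.1 : Option String) == some k) = false by simpa using h]
      exact ih

lemma mapK_getD (d : PySem.Dict String Int) (k : String) (dflt : Int) :
    (mapK d).getD (some k) dflt = d.getD k dflt := by
  simp [PySem.Dict.getD, mapK_get?]

lemma mapK_contains (d : PySem.Dict String Int) (k : String) :
    (mapK d).contains (some k) = d.contains k := by
  rw [PySem.Dict.contains_eq_isSome_get?, PySem.Dict.contains_eq_isSome_get?, mapK_get?]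

lemma mapK_insert (d : PySem.Dict String Int) (k : String) (v : Int) :
    (mapK d).insert (some k) v = mapK (d.insert k v) := by
  simp only [PySem.Dict.insert, mapK_contains]
  by_cases h : d.contains k
  · simp only [h, if_true, mapK]
    congr 1
    rw [List.map_map, List.map_map]
    apply List.map_congr_left
    intro p _
    by_cases hk : p.1 == k
    · simp [Function.comp, hk, show ((some p.1 : Option String) == some k) = true by simpa using hk]
    · simp [Function.comp, hk, show ((some p.1 : Option String) == some k) = false by simpa using hk]
  · simp [h, mapK]

lemma values_mapK (d : PySem.Dict String Int) : (mapK d).values = d.values := by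
  simp [mapK, PySem.Dict.values, List.map_map, Function.comp]

-- reverse bookkeeping for the end-of-list stacks
lemma getLast?_of_reverse {l : List String} {c : String} {rest : List String}
    (h : l.reverse = c :: rest) : l.getLast? = some c := by
  rw [← List.head?_reverse, h]; rfl

lemma dropLast_reverse_of_reverse {l : List String} {c : String} {rest : List String}
    (h : l.reverse = c :: rest) : l.dropLast.reverse = rest := by
  have hl : l = rest.reverse ++ [c] := by
    have := congrArg List.reverse h
    simpa using this
  subst hl
  simp

-- one token preserves the simulation
lemma step_sim (a : List ANode × Nat × PySem.Dict (Option String) Int)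
    (b : List String × Option String × List String × PySem.Dict String Int)
    (tok : String) (h : Sim a b) : Sim (stepA a tok) (stepB b tok) := by
  obtain ⟨arr, cur, visit⟩ := a
  obtain ⟨back, curB, fwd, visitB⟩ := b
  obtain ⟨hlen, hback, hdata, hfwd, hnone, hvis⟩ := h
  simp only at hlen hback hdata hfwd hnone hvis
  by_cases hd : PySem.Str.strIsdigit tok = true
  · -- digit token: new page
    simp only [stepA, stepB, hd, if_true]
    refine ⟨by simp, ?_, ?_, ?_, ?_, ?_⟩
    · -- back stack
      rcases curB with _ | c
      · -- current is the head: back must be empty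
        obtain ⟨-, hbk⟩ := hnone hdata
        subst hbk
        simp only [List.reverse_nil, BackSim, prevF, getElem?_append_len, Option.bind_some]
        exact ⟨hlen, by rw [dataF_mod arr cur (some arr.length) _ hlen]; exact hdata⟩
      · simp only [List.reverse_append, List.reverse_cons, List.reverse_nil, List.nil_append,
          List.singleton_append]
        exact ⟨cur, by simp only [prevF, getElem?_append_len, Option.bind_some], hlen,
          by rw [dataF_mod arr cur (some arr.length) _ hlen]; exact hdata,
          nextF_mod_self arr cur (some arr.length) _ hlen,
          backSim_mod arr cur (some arr.length) _ back.reverse cur hback hlen le_rfl⟩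
    · simp only [dataF, getElem?_append_len, Option.bind_some]
    · simp only [List.reverse_nil, FwdSim, nextF, getElem?_append_len, Option.bind_some]
    · intro hc; simp only [dataF, getElem?_append_len, Option.bind_some] at hc; cases hc
    · simp only [hvis, mapK_getD, mapK_insert]
  · by_cases hb : (tok == "B") = true
    · -- back navigation
      simp only [stepA, stepB, hd, hb, if_false, if_true, Bool.false_eq_true]
      rcases hr : back.reverse with _ | ⟨c, rest⟩
      · -- empty back stack: A's guard fails too
        rw [List.reverse_eq_nil_iff] at hr
        subst hr
        simp only [List.reverse_nil] at hback
        simp only [List.getLast?_nil]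
        rcases hp : prevF arr cur with _ | p
        · exact ⟨hlen, by simpa using hback, hdata, hfwd, hnone, hvis⟩
        · simp only [BackSim, hp] at hback
          simp only [hback.2]
          exact ⟨hlen, by simp only [List.reverse_nil, BackSim, hp]; exact hback, hdata, hfwd, hnone, hvis⟩
      · rw [hr] at hback
        obtain ⟨p, hp, hpc, hdp, hnp, hrec⟩ := hback
        rw [getLast?_of_reverse hr]
        simp only [hp, hdp]
        rcases curB with _ | x
        · -- impossible: current is head but back nonempty
          exfalso
          have := (hnone hdata).2
          subst this
          simp at hr
        · refine ⟨lt_of_nextF_some hnp, ?_, hdp, ?_, ?_, ?_⟩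
          · rw [dropLast_reverse_of_reverse hr]; exact hrec
          · simp only [List.reverse_append, List.reverse_cons, List.reverse_nil, List.nil_append,
              List.singleton_append, FwdSim]
            exact ⟨cur, hnp, hpc, hdata, hp, hfwd⟩
          · intro hc; rw [hdp] at hc; simp at hc
          · simp only [hvis, mapK_getD, mapK_insert]
    · by_cases hf : (tok == "F") = true
      · -- forward navigation
        simp only [stepA, stepB, hd, hb, hf, if_false, if_true, Bool.false_eq_true]
        rcases hr : fwd.reverse with _ | ⟨c, rest⟩
        · rw [List.reverse_eq_nil_iff] at hr
          subst hr
          simp only [List.reverse_nil, FwdSim] at hfwd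
          rw [hfwd]
          simp only [List.getLast?_nil]
          exact ⟨hlen, hback, hdata, by simp only [List.reverse_nil, FwdSim]; exact hfwd, hnone, hvis⟩
        · rw [hr] at hfwd
          obtain ⟨n, hn, hcn, hdn, hpn, hrec⟩ := hfwd
          rw [getLast?_of_reverse hr]
          simp only [hn, hdn]
          rcases curB with _ | x
          · exfalso
            have := (hnone hdata).1
            rw [this] at hn
            simp at hn
          · refine ⟨lt_of_dataF_some hdn, ?_, hdn, ?_, ?_, ?_⟩
            · simp only [List.reverse_append, List.reverse_cons, List.reverse_nil, List.nil_append,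
                List.singleton_append, BackSim]
              exact ⟨cur, hpn, hcn, hdata, hn, hback⟩
            · rw [dropLast_reverse_of_reverse hr]; exact hrec
            · intro hc; rw [hdn] at hc; simp at hc
            · simp only [hvis, mapK_getD, mapK_insert]
      · simp only [stepA, stepB, hd, hb, hf, if_false, Bool.false_eq_true]
        exact ⟨hlen, hback, hdata, hfwd, hnone, hvis⟩

lemma fold_sim (toks : List String)
    (a : List ANode × Nat × PySem.Dict (Option String) Int)
    (b : List String × Option String × List String × PySem.Dict String Int)
    (h : Sim a b) : Sim (toks.foldl stepA a) (toks.foldl stepB b) := by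
  induction toks generalizing a b with
  | nil => exact h
  | cons t ts ih => exact ih _ _ (step_sim a b t h)

lemma sim_init : Sim ([((none : Option String), (none : Option Nat), (none : Option Nat))], 0, PySem.Dict.empty)
    ([], (none : Option String), [], PySem.Dict.empty) := by
  refine ⟨by simp, ?_, ?_, ?_, ?_, ?_⟩
  · simp [BackSim, prevF]
  · rfl
  · simp [FwdSim, nextF]
  · intro _; exact ⟨rfl, rfl⟩
  · rfl

-- ===== VERDICT (by name: the statement is the Claim_ definition above) =====
theorem solution_spec : Claim_equal_solution := by
  intro s _
  have h := fold_sim (PySem.Str.split₀ s) _ _ sim_init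
  show solution s = solution_alt s
  unfold solution solution_alt
  simp only [h.2.2.2.2.2, values_mapK]
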